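-- pv_equiv track=rewrite | github.com/Tiago-Vier-Preto/autoClipSynth | core/synth.py | calculate_duplication_cost
-- ===== SOURCE A (Python) =====
-- def calculate_duplication_cost(video_segments):
--     video_counts = {}
--     for segment_list in zip(*video_segments):
--         for segment in segment_list:
--             if segment not in video_counts:
--                 video_counts[segment] = 0
--             video_counts[segment] += 1
--
--     duplication_cost = 0
--     for count in video_counts.values():
--         if count > 1:
--             duplication_cost += 2**(count - 1) - 1
--
--     return duplication_cost
-- ===== SOURCE B (Python) =====
-- def calculate_duplication_cost(video_segments):
--     flat = sorted(segment for segment_list in zip(*video_segments)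
--                   for segment in segment_list)
--     total = 0
--     run = 0
--     prev = None
--     for segment in flat:
--         if run and segment == prev:
--             run += 1
--         else:
--             if run > 1:
--                 total += 2 ** (run - 1) - 1
--             run = 1
--             prev = segment
--     if run > 1:
--         total += 2 ** (run - 1) - 1
--     return total
-- ===== Notes on version B (the rewrite author's own statement) =====
-- stated objective: alternative
-- what changed: B replaces A's count-dictionary (build counts, then sum 2**(count-1)-1 over its values) by sort-then-scan: it sorts the flattened segment stream and sums 2**(run-1)-1 over the lengths of the runs of equal segments.
import Mathlib
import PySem

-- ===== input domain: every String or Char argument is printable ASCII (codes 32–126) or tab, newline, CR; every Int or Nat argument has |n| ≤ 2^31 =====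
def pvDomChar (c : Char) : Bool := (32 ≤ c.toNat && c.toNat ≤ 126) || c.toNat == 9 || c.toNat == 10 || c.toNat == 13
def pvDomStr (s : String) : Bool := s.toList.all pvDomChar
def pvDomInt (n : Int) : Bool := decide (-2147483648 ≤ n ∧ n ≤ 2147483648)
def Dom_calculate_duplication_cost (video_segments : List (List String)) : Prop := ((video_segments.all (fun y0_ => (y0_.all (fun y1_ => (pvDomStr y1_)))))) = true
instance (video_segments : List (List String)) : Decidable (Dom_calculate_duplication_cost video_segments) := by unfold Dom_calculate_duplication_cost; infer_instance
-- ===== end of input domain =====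

-- B replaces A's count-dictionary (build counts, then sum 2**(count-1)-1 over its values)
-- by sort-then-scan: sort the flattened segment stream and sum 2**(run-1)-1 over run lengths.

-- ===== PORT A =====
-- shared helper: Python's zip(*video_segments) (truncates to the shortest list)
def zipStar (xss : List (List String)) : List (List String) :=
  match xss with
  | [] => []
  | x :: rest =>
    let n := rest.foldl (fun m ys => min m ys.length) x.length
    (List.range n).map (fun i => (x :: rest).map (fun ys => ys.getD i ""))

def calculate_duplication_cost (video_segments : List (List String)) : Int :=
  let video_counts : PySem.Dict String Int :=
    (zipStar video_segments).foldl (fun d segment_list =>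
      segment_list.foldl (fun d segment =>
        let d := if d.contains segment then d else d.insert segment 0
        d.insert segment (d.getD segment 0 + 1)) d)
      PySem.Dict.empty
  video_counts.values.foldl (fun duplication_cost count =>
      if count > 1 then duplication_cost + ((2:Int) ^ (count - 1).toNat - 1)
      else duplication_cost) 0

-- ===== PORT B =====
-- loop body of B's run-scan ('for segment in flat: …')
def bStep (st : Int × Int × Option String) (segment : String) : Int × Int × Option String :=
  if st.2.1 ≠ 0 ∧ st.2.2 = some segment then (st.1, st.2.1 + 1, st.2.2)
  else ((if st.2.1 > 1 then st.1 + ((2:Int) ^ (st.2.1 - 1).toNat - 1) else st.1),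
        1, some segment)

def calculate_duplication_cost_alt (video_segments : List (List String)) : Int :=
  let flat := PySem.List.sorted (zipStar video_segments).flatten (fun s => s) false
  let st := flat.foldl bStep (0, 0, none)
  if st.2.1 > 1 then st.1 + ((2:Int) ^ (st.2.1 - 1).toNat - 1) else st.1

-- ===== PRECONDITION & SPEC =====
def Spec_calculate_duplication_cost (video_segments : List (List String)) (out : Int) : Prop := out = calculate_duplication_cost_alt video_segments
instance (video_segments : List (List String)) (out : Int) : Decidable (Spec_calculate_duplication_cost video_segments out) := by unfold Spec_calculate_duplication_cost; infer_instance

-- ===== CLAIM (what is proved, stated in full; the proofs are below) =====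
def Claim_equal_calculate_duplication_cost : Prop := ∀ (video_segments : List (List String)), Dom_calculate_duplication_cost video_segments → Spec_calculate_duplication_cost video_segments (calculate_duplication_cost video_segments)

-- ===== LEMMAS AND PROOFS =====

-- per-segment cost of a multiplicity c
def fCost (c : Int) : Int := if c > 1 then (2:Int) ^ (c - 1).toNat - 1 else 0

-- total cost of the multiset of segments p
def costOf (p : List String) : Int :=
  (((PySem.Dict.counter p : PySem.Dict String Int)).values.map fCost).sum

lemma stepA_eq :
    (fun (d : PySem.Dict String Int) (s : String) =>
      let d := if d.contains s then d else d.insert s 0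
      d.insert s (d.getD s 0 + 1)) =
    fun d s => d.insert s (d.getD s 0 + 1) := by
  funext d s
  by_cases h : d.contains s
  · simp [h]
  · have hg : d.get? s = none := by
      rw [PySem.Dict.get?_eq_none_iff_contains]; simpa using h
    simp [h, PySem.Dict.getD, hg, PySem.Dict.insert_insert_self]

lemma foldl_cost (l : List Int) : ∀ a : Int,
    l.foldl (fun acc c => if c > 1 then acc + ((2:Int) ^ (c - 1).toNat - 1) else acc) a
      = a + (l.map fCost).sum := by
  induction l with
  | nil => intro a; simp
  | cons c l ih =>
    intro a
    simp only [List.foldl_cons, List.map_cons, List.sum_cons, ih, fCost]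
    split_ifs <;> ring

lemma costOf_eq_sum_set (p : List String) :
    costOf p = ((PySem.Set.ofList p).map (fun k => fCost ((p.count k : Int)))).sum := by
  simp only [costOf, PySem.Dict.values, PySem.Dict.items_counter, List.map_map]
  rfl

lemma costOf_nil : costOf [] = 0 := rfl

lemma if_fCost (t r : Int) :
    (if r > 1 then t + ((2:Int) ^ (r - 1).toNat - 1) else t) = t + fCost r := by
  unfold fCost; split_ifs <;> ring

lemma sum_map_eq_of_mem_iff (g : String → Int) (s t : List String)
    (hs : s.Nodup) (ht : t.Nodup) (h : ∀ k, k ∈ s ↔ k ∈ t) :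
    (s.map g).sum = (t.map g).sum :=
  (((List.perm_ext_iff_of_nodup hs ht).mpr h).map g).sum_eq

lemma costOf_perm (l l' : List String) (h : l.Perm l') : costOf l = costOf l' := by
  rw [costOf_eq_sum_set, costOf_eq_sum_set]
  have hg : (fun k => fCost ((l.count k : Int))) = fun k => fCost ((l'.count k : Int)) :=
    funext fun k => by rw [h.count_eq]
  rw [hg]
  exact sum_map_eq_of_mem_iff _ _ _ (PySem.Set.nodup_ofList l) (PySem.Set.nodup_ofList l')
    (fun k => by rw [PySem.Set.mem_ofList, PySem.Set.mem_ofList]; exact h.mem_iff)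

lemma costOf_cons (y : String) (m : List String) :
    costOf (y :: m) = fCost ((m.count y : Int) + 1) + costOf (m.filter (· ≠ y)) := by
  rw [costOf_eq_sum_set, costOf_eq_sum_set, PySem.Set.ofList_cons]
  simp only [List.map_cons, List.sum_cons, List.count_cons_self]
  have h1 : ((m.count y : Int) + 1) = (((m.count y + 1 : Nat)) : Int) := by push_cast; ring
  rw [h1]
  congr 1
  have hcongr : ∀ k ∈ PySem.Set.discard (PySem.Set.ofList m) y,
      fCost (((y :: m).count k : Int)) = fCost (((m.filter (· ≠ y)).count k : Int)) := by
    intro k hk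
    have hky : k ≠ y := ((PySem.Set.mem_discard _ _ _).mp hk).2
    have h2 : (y :: m).count k = m.count k := by
      have hyk : ¬ y = k := fun h => hky h.symm
      simp [hyk]
    have h3 : (m.filter (· ≠ y)).count k = m.count k := by
      rw [List.count_filter]; simp [hky]
    rw [h2, h3]
  rw [List.map_congr_left hcongr]
  apply sum_map_eq_of_mem_iff
  · exact PySem.Set.nodup_discard _ _ (PySem.Set.nodup_ofList m)
  · exact PySem.Set.nodup_ofList _
  · intro k
    rw [PySem.Set.mem_discard, PySem.Set.mem_ofList, PySem.Set.mem_ofList,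
      List.mem_filter]
    simp

-- loop invariant of B's run-scan: mid-run state (t, r, some x) on a sorted remainder
lemma run_inv : ∀ (l : List String), l.Pairwise (· ≤ ·) →
    ∀ (x : String) (t r : Int), 1 ≤ r → (∀ y ∈ l, x ≤ y) →
    (l.foldl bStep (t, r, some x)).1 + fCost (l.foldl bStep (t, r, some x)).2.1
      = t + fCost (r + (l.count x : Int)) + costOf (l.filter (· ≠ x)) := by
  intro l
  induction l with
  | nil =>
    intro _ x t r _ _
    simp only [List.foldl_nil, List.count_nil, List.filter_nil]
    rw [costOf_nil]
    ring_nf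
  | cons y ys ih =>
    intro hp x t r hr hall
    have hy : ∀ z ∈ ys, y ≤ z := fun z hz => List.rel_of_pairwise_cons hp hz
    have hp' : ys.Pairwise (· ≤ ·) := (List.pairwise_cons.mp hp).2
    by_cases hxy : x = y
    · subst hxy
      have hstep : bStep (t, r, some x) x = (t, r + 1, some x) := by
        have hr0 : r ≠ 0 := by omega
        simp [bStep, hr0]
      simp only [List.foldl_cons, hstep]
      rw [ih hp' x t (r + 1) (by omega) hy]
      have hfil : (x :: ys).filter (· ≠ x) = ys.filter (· ≠ x) := by
        simp
      rw [hfil, List.count_cons_self]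
      have e : (r + 1) + (ys.count x : Int) = r + ((ys.count x + 1 : Nat) : Int) := by
        push_cast; ring
      rw [e]
    · have hxny : x ∉ y :: ys := by
        intro hmem
        rcases List.mem_cons.mp hmem with h | h
        · exact hxy h
        · exact hxy (le_antisymm (hall y List.mem_cons_self) (hy x h))
      have hstep : bStep (t, r, some x) y =
          ((if r > 1 then t + ((2:Int) ^ (r - 1).toNat - 1) else t), 1, some y) := by
        unfold bStep
        rw [if_neg]
        rintro ⟨-, h⟩
        exact hxy (Option.some.inj h)
      simp only [List.foldl_cons, hstep]
      rw [if_fCost, ih hp' y (t + fCost r) 1 le_rfl hy]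
      have hx0 : (y :: ys).count x = 0 := List.count_eq_zero.mpr hxny
      have hxys : x ∉ ys := fun h => hxny (List.mem_cons_of_mem _ h)
      have hfil : (y :: ys).filter (· ≠ x) = y :: ys := by
        rw [List.filter_eq_self]
        intro a ha
        have hax : ¬ a = x := fun h => hxny (h ▸ ha)
        simp [hax]
      rw [hx0, hfil, costOf_cons]
      have e1 : r + ((0 : Nat) : Int) = r := by norm_num
      have e2 : (1:Int) + (ys.count y : Int) = (ys.count y : Int) + 1 := by ring
      rw [e1, e2]
      ring_nf

-- ===== VERDICT (by name: the statement is the Claim_ definition above) =====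
theorem calculate_duplication_cost_spec : Claim_equal_calculate_duplication_cost := by
  intro vs _
  unfold Spec_calculate_duplication_cost calculate_duplication_cost calculate_duplication_cost_alt
  rw [← List.foldl_flatten]
  set L := (zipStar vs).flatten with hL
  rw [stepA_eq, PySem.Dict.foldl_insert_getD_add_one_eq_counter, foldl_cost]
  have hA : (0:Int) + ((PySem.Dict.counter L : PySem.Dict String Int).values.map fCost).sum
      = costOf L := by simp [costOf]
  rw [hA]
  rcases hS : PySem.List.sorted L (fun s => s) false with _ | ⟨y, t⟩
  · have hLnil : L = [] := (PySem.List.sorted_eq_nil_iff _ _ _).mp hS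
    rw [hLnil]
    decide
  · have hperm : (y :: t).Perm L := hS ▸ PySem.List.sorted_perm L (fun s => s) false
    have hpw : (y :: t).Pairwise (· ≤ ·) := by
      have := PySem.List.sorted_pairwise L (fun s => s)
      rw [hS] at this; exact this
    have hy : ∀ z ∈ t, y ≤ z := fun z hz => List.rel_of_pairwise_cons hpw hz
    have hstep0 : bStep (0, 0, none) y = (0, 1, some y) := by
      unfold bStep
      rw [if_neg (by rintro ⟨h, -⟩; exact h rfl)]
      norm_num
    simp only [List.foldl_cons, hstep0]
    rw [if_fCost, run_inv t (List.pairwise_cons.mp hpw).2 y 0 1 le_rfl hy]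
    rw [← costOf_perm _ _ hperm, costOf_cons]
    ring_nf
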